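-- pv_equiv track=rewrite | github.com/Sanmitha-Sadhishkumar/strman | strman/strman.py | cwlcount
-- ===== SOURCE A (Python) =====
-- def cwlcount(a):
--         if isinstance(a,str)==False:
--                 raise TypeError("invalid argument for type 'str'")
--         else:
--                 b,c,k=a.split('.'),"",[]
--                 c=a.replace('.','')
--                 d,e=list(c.split()),list()
--                 for i in c:
--                         e.append(i)
--                 b1,d1,e1=set(b),set(d),set(e)
--                 def fun(g,g1):
--                         h={}
--                         for i in g1:
--                                 h[i]=g.count(i)
--                         k.append(h)
--                 fun(e,e1)
--                 fun(d,d1)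
--                 fun(b,b1)
--                 return k
-- ===== SOURCE B (Python) =====
-- def cwlcount(a):
--     if isinstance(a, str) == False:
--         raise TypeError("invalid argument for type 'str'")
--     c = a.replace('.', '')
--     out = []
--     for seq in (list(c), c.split(), a.split('.')):
--         tally = {}
--         for x in seq:
--             tally[x] = tally.get(x, 0) + 1
--         out.append(tally)
--     return out
-- ===== Notes on version B (the rewrite author's own statement) =====
-- stated objective: faster
-- what changed: Replaces the per-unique-element loop that rescans the whole sequence with .count (and the closure appending to k) by a single forward pass per sequence that increments a tally dict.
import Mathlib
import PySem

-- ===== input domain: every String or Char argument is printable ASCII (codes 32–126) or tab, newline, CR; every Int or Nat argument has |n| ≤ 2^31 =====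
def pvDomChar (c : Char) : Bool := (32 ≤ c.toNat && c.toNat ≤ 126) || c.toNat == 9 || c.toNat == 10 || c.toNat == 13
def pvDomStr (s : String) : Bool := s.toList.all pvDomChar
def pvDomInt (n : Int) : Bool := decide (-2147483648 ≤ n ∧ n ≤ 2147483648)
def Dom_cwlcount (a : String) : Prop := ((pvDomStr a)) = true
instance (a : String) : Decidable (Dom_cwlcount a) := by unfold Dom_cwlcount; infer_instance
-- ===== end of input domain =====

-- B replaces A's per-unique-element rescans (.count over the whole list for each set element)
-- with one forward counting pass per sequence; return values agree exactly.

-- ===== PORT A =====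
-- a.split('.'): sep "." is nonempty, so PySem.Str.split? is `some` and `.getD []` is exact.
-- A's nested `fun g g1` with g1 = set(g): loop over the set, h[i] = g.count(i)
def cwlcount_fun (g : List String) : List (String × Int) :=
  ((PySem.Set.ofList g).foldl
    (fun h i => h.insert i (g.count i : Int)) PySem.Dict.empty).items

def cwlcount (a : String) : List (List (String × Int)) :=
  let b := ((PySem.Str.split? a ".").getD [])
  let c := PySem.Str.replace a "." ""
  let d := PySem.Str.split₀ c
  -- for i in c: e.append(i)
  let e := c.toList.foldl (fun acc i => acc ++ [String.ofList [i]]) []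
  let k : List (List (String × Int)) := []
  let k := k ++ [cwlcount_fun e]
  let k := k ++ [cwlcount_fun d]
  let k := k ++ [cwlcount_fun b]
  k

-- ===== PORT B =====
-- one forward pass: tally[x] = tally.get(x, 0) + 1
def cwlcount_tally (seq : List String) : List (String × Int) :=
  (seq.foldl (fun t x => t.insert x (t.getD x 0 + 1)) PySem.Dict.empty).items

def cwlcount_alt (a : String) : List (List (String × Int)) :=
  let c := PySem.Str.replace a "." ""
  [cwlcount_tally (c.toList.map (fun ch => String.ofList [ch])),
   cwlcount_tally (PySem.Str.split₀ c),
   cwlcount_tally (((PySem.Str.split? a ".").getD []))]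

-- ===== PRECONDITION & SPEC =====
def Spec_cwlcount (a : String) (out : List (List (String × Int))) : Prop := out = cwlcount_alt a
instance (a : String) (out : List (List (String × Int))) : Decidable (Spec_cwlcount a out) := by unfold Spec_cwlcount; infer_instance

-- ===== CLAIM (what is proved, stated in full; the proofs are below) =====
def Claim_equal_cwlcount : Prop := ∀ (a : String), Dom_cwlcount a → Spec_cwlcount a (cwlcount a)

-- ===== LEMMAS AND PROOFS =====

theorem cwlcount_foldl_append_eq_map {α β : Type} (f : α → β) (l : List α) :
    l.foldl (fun acc i => acc ++ [f i]) [] = l.map f := by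
  have h : ∀ (acc : List β), l.foldl (fun acc i => acc ++ [f i]) acc = acc ++ l.map f := by
    induction l with
    | nil => simp
    | cons x xs ih => intro acc; simp [List.foldl, ih]
  simpa using h []

theorem cwlcount_fun_eq_tally (g : List String) : cwlcount_fun g = cwlcount_tally g := by
  unfold cwlcount_fun cwlcount_tally
  rw [PySem.Dict.foldl_insert_getD_add_one_eq_counter, PySem.Dict.items_counter]
  rw [PySem.Dict.items_foldl_insert_fresh (k := fun i => i) (v := fun i => (g.count i : Int))]
  · simp [PySem.Dict.empty]
  · intro x _; exact PySem.Dict.contains_empty x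
  · simp [PySem.Set.nodup_ofList g]

-- ===== VERDICT (by name: the statement is the Claim_ definition above) =====
theorem cwlcount_spec : Claim_equal_cwlcount := by
  intro a _
  show cwlcount a = cwlcount_alt a
  unfold cwlcount cwlcount_alt
  simp only [List.nil_append]
  rw [cwlcount_foldl_append_eq_map, cwlcount_fun_eq_tally, cwlcount_fun_eq_tally,
      cwlcount_fun_eq_tally]
  simp
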